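-- pv_equiv track=rewrite | github.com/gwqw/LessonsSolution | checkio/04_OReilly/04_OReilly_10p_StripedWords.py | isword
-- ===== SOURCE A (Python) =====
-- VOWELS = "AEIOUY"
--
-- CONSONANTS = "BCDFGHJKLMNPQRSTVWXZ"
--
-- def isword(w):
--     # length checking
--     if len(w) < 2:
--         return False
--
--     # check first symbol
--     w = w.upper()
--     if w[0] in VOWELS:
--         isVowel = True
--     elif w[0] in CONSONANTS:
--         isVowel = False
--     else:
--         return False
--
--     # check other symbols
--     for l in w[1:]:
--         if l not in VOWELS and l not in CONSONANTS:
--             return False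
--         if l in VOWELS and isVowel:
--             return False
--         if l in CONSONANTS and not isVowel:
--             return False
--         isVowel = not isVowel
--
--     return True
-- ===== SOURCE B (Python) =====
-- VOWELS = "AEIOUY"
--
-- CONSONANTS = "BCDFGHJKLMNPQRSTVWXZ"
--
-- def isword(w):
--     # classify-then-verify decomposition: first build the category list,
--     # then check adjacent categories differ
--     if len(w) < 2:
--         return False
--     cats = []
--     for ch in w.upper():
--         if ch in VOWELS:
--             cats.append(True)
--         elif ch in CONSONANTS:
--             cats.append(False)
--         else:
--             return False
--     return all(a != b for a, b in zip(cats, cats[1:]))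
-- ===== Notes on version B (the rewrite author's own statement) =====
-- stated objective: alternative
-- what changed: Replaces A's single interleaved scan carrying an isVowel flag with a two-phase decomposition: one pass classifying every character into a boolean category list, then a separate adjacency pass over zipped neighbours.
import Mathlib
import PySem

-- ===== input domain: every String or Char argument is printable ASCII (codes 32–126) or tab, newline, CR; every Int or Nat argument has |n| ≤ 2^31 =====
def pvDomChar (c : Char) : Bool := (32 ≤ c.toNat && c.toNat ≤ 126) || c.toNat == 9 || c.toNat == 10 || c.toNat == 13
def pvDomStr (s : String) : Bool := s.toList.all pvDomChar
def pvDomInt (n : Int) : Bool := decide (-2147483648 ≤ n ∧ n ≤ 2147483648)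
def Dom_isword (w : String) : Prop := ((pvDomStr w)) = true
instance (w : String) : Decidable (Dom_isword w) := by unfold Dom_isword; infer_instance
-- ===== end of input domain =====

-- B replaces A's interleaved flag-carrying scan by a classify-then-verify decomposition (same cost).

-- ===== PORT A =====
def pvVowels : List Char := "AEIOUY".toList
def pvCons : List Char := "BCDFGHJKLMNPQRSTVWXZ".toList

-- A's 'for l in w[1:]' loop carrying the isVowel flag, early returns as base cases
def iswordLoop : List Char → Bool → Bool
  | [], _ => true
  | l :: rest, isVowel =>
    if l ∉ pvVowels ∧ l ∉ pvCons then false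
    else if l ∈ pvVowels ∧ isVowel then false
    else if l ∈ pvCons ∧ !isVowel then false
    else iswordLoop rest (!isVowel)

def isword (w : String) : Bool :=
  if PySem.Str.len w < 2 then false
  else
    match (PySem.Str.upper w).toList with  -- w[0] / w[1:]; nonempty since len ≥ 2
    | [] => false
    | c :: rest =>
      if c ∈ pvVowels then iswordLoop rest true
      else if c ∈ pvCons then iswordLoop rest false
      else false

-- ===== PORT B =====
-- B's classification loop: the category list, none = early 'return False'
def pvClassify : List Char → Option (List Bool)
  | [] => some []
  | c :: rest =>
    if c ∈ pvVowels then (pvClassify rest).map (true :: ·)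
    else if c ∈ pvCons then (pvClassify rest).map (false :: ·)
    else none

def isword_alt (w : String) : Bool :=
  if PySem.Str.len w < 2 then false
  else
    match pvClassify (PySem.Str.upper w).toList with
    | none => false
    | some cats => (cats.zip (cats.drop 1)).all (fun p => p.1 != p.2)

-- ===== PRECONDITION & SPEC =====
def Spec_isword (w : String) (out : Bool) : Prop := out = isword_alt w
instance (w : String) (out : Bool) : Decidable (Spec_isword w out) := by unfold Spec_isword; infer_instance

-- ===== CLAIM (what is proved, stated in full; the proofs are below) =====
def Claim_equal_isword : Prop := ∀ (w : String), Dom_isword w → Spec_isword w (isword w)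

-- ===== LEMMAS AND PROOFS =====

-- A's flag-carrying loop equals B's adjacency check on the classified tail, prefixed by the flag
theorem iswordLoop_classify (cs : List Char) (v : Bool) :
    iswordLoop cs v = match pvClassify cs with
      | none => false
      | some cats => ((v :: cats).zip cats).all (fun p => p.1 != p.2) := by
  induction cs generalizing v with
  | nil => simp [iswordLoop, pvClassify]
  | cons c rest ih =>
    by_cases hv : c ∈ pvVowels
    · by_cases hc : c ∈ pvCons
      · exfalso
        simp [pvVowels] at hv
        rcases hv with rfl | rfl | rfl | rfl | rfl | rfl <;> simp [pvCons] at hc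
      · cases hrest : pvClassify rest with
        | none => cases v <;> simp [iswordLoop, pvClassify, hv, hc, hrest, ih, Bool.not_eq_true]
        | some cats => cases v <;> simp [iswordLoop, pvClassify, hv, hc, hrest, ih, Bool.not_eq_true]
    · by_cases hc : c ∈ pvCons
      · cases hrest : pvClassify rest with
        | none => cases v <;> simp [iswordLoop, pvClassify, hv, hc, hrest, ih, Bool.not_eq_true]
        | some cats => cases v <;> simp [iswordLoop, pvClassify, hv, hc, hrest, ih, Bool.not_eq_true]
      · simp [iswordLoop, pvClassify, hv, hc]

-- ===== VERDICT (by name: the statement is the Claim_ definition above) =====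
theorem isword_spec : Claim_equal_isword := by
  intro w _
  unfold Spec_isword isword isword_alt
  have hl : PySem.Str.len w = (w.length : Int) := by simp
  rw [hl]
  by_cases hlen : w.length < 2
  · have h : ((w.length : Int) < 2) := by exact_mod_cast hlen
    rw [if_pos h, if_pos h]
  · have h : ¬ ((w.length : Int) < 2) := by exact_mod_cast hlen
    rw [if_neg h, if_neg h]
    cases hu : (PySem.Str.upper w).toList with
    | nil =>
      exfalso
      have hlu : (PySem.Str.upper w).toList.length = w.length := by
        simp [PySem.Str.toList_upper, PySem.Chars.upper]
      rw [hu] at hlu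
      simp at hlu
      omega
    | cons c rest =>
      by_cases hv : c ∈ pvVowels
      · simp only [hv, if_true, pvClassify, iswordLoop_classify]
        cases pvClassify rest <;> simp
      · by_cases hc : c ∈ pvCons
        · simp only [hv, hc, if_true, if_false, pvClassify, iswordLoop_classify]
          cases pvClassify rest <;> simp
        · simp [pvClassify, hv, hc]
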